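-- pv_equiv track=rewrite | github.com/codesquad-backend-study/daily-algorithm-challenge | Sully/baekjoon/B1032.py | solution
-- ===== SOURCE A (Python) =====
-- from typing import List
--
-- def solution(N: int, patterns: List) -> str:
--     answer = ''
--     q = False
--
--     length = len(patterns[0])
--     for i in range(length):
--         s = patterns[0][i]
--         for j in range(N):
--             if s != patterns[j][i]:
--                 q = True
--                 break
--
--         if q:
--             answer += '?'
--         else:
--             answer += s
--
--         q = False
--
--     return answer
-- ===== SOURCE B (Python) =====
-- def solution(N, patterns):
--     ans = patterns[0]
--     for j in range(1, N):
--         p = patterns[j]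
--         ans = ''.join(a if a == b else '?' for a, b in zip(ans, p))
--     return ans
-- ===== Notes on version B (the rewrite author's own statement) =====
-- stated objective: alternative
-- what changed: B replaces A's column-major double loop with a break flag by a row-major reduction: it keeps a running mask string and merges each subsequent pattern into it pairwise with zip, turning positions that disagree into '?'.
-- outside the precondition, e.g. on solution(3, ['ab', 'xy']): A returns '??', B raises IndexError; on solution(3, ['ab', 'cd', 'e']): A returns '??', B returns '?'
import Mathlib
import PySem

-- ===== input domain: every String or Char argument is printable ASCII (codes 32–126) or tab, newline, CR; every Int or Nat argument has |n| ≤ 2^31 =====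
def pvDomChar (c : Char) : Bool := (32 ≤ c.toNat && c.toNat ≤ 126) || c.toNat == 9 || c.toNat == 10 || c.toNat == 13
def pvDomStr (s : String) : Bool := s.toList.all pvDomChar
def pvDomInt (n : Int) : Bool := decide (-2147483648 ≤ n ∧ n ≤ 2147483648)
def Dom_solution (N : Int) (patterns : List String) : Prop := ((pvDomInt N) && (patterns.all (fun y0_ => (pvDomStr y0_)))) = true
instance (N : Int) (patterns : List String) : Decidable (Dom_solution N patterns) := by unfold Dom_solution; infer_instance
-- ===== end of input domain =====

-- B replaces A's column-major double loop with a break flag by a row-major reduction: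
-- it keeps a running mask string and merges each later pattern into it with zip,
-- turning disagreeing positions into '?' (alternative; same cost).

-- ===== PORT A =====
def solution (N : Int) (patterns : List String) : String :=
  let p0 : List Char := ((PySem.List.pyGet? patterns 0).getD "").toList
  let length : Int := p0.length
  String.ofList ((PySem.List.pyRange 0 length 1).foldl (fun answer i =>
    let s : Char := (PySem.List.pyGet? p0 i).getD ' '
    let q : Bool := (PySem.List.pyRange 0 N 1).foldl (fun q j =>
      if q then q
      else if s ≠ ((PySem.List.pyGet? (((PySem.List.pyGet? patterns j).getD "").toList) i).getD ' ')
           then true else q) false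
    if q then answer ++ ['?'] else answer ++ [s]) [])

-- ===== PORT B =====
def solution_alt (N : Int) (patterns : List String) : String :=
  let ans0 : List Char := ((PySem.List.pyGet? patterns 0).getD "").toList
  String.ofList ((PySem.List.pyRange 1 N 1).foldl (fun ans j =>
    let p : List Char := ((PySem.List.pyGet? patterns j).getD "").toList
    (ans.zip p).map (fun ab => if ab.1 = ab.2 then ab.1 else '?')) ans0)

-- ===== PRECONDITION & SPEC =====
-- Pre_ excludes the calls on which A raises IndexError (empty patterns; N > len(patterns) or a
-- compared pattern shorter than patterns[0] when some column reaches the missing index), and —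
-- because whether A raises there depends on an accidental early break — it also excludes the
-- remaining N > len(patterns) / short-pattern calls on which A happens to return because every
-- column mismatches before the missing index is read (B raises or truncates there; see cites).
def Pre_solution (N : Int) (patterns : List String) : Prop :=
  patterns ≠ [] ∧ N ≤ (patterns.length : Int) ∧
  ∀ p ∈ patterns.take N.toNat, (patterns.headD "").toList.length ≤ p.toList.length
instance (N : Int) (patterns : List String) : Decidable (Pre_solution N patterns) := by
  unfold Pre_solution; infer_instance
def pvWitness_solution : Int × List String := (2, ["abcd", "abed"])
def Spec_solution (N : Int) (patterns : List String) (out : String) : Prop := out = solution_alt N patterns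
instance (N : Int) (patterns : List String) (out : String) : Decidable (Spec_solution N patterns out) := by unfold Spec_solution; infer_instance

-- ===== CLAIM (what is proved, stated in full; the proofs are below) =====
def Claim_equal_solution : Prop := ∀ (N : Int) (patterns : List String), Dom_solution N patterns → Pre_solution N patterns → Spec_solution N patterns (solution N patterns)

-- ===== LEMMAS AND PROOFS =====

-- A's break-flag inner loop is an 'any'
theorem pv_foldl_or {α : Type} (p : α → Prop) [DecidablePred p] :
    ∀ (l : List α) (b : Bool),
      l.foldl (fun q j => if q then q else if p j then true else q) b
        = (b || l.any (fun j => decide (p j))) := by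
  intro l
  induction l with
  | nil => intro b; simp
  | cons a t ih =>
    intro b
    simp only [List.foldl_cons, List.any_cons, ih]
    cases b <;> by_cases h : p a <;> simp [h]

-- A's outer append loop is a map
theorem pv_foldl_if_append {α β : Type} (p : α → Bool) (g1 g2 : α → β) :
    ∀ (l : List α) (acc : List β),
      l.foldl (fun a i => if p i then a ++ [g1 i] else a ++ [g2 i]) acc
        = acc ++ l.map (fun i => if p i then g1 i else g2 i) := by
  intro l
  induction l with
  | nil => intro acc; simp
  | cons a t ih =>
    intro acc
    by_cases h : p a = true <;> simp [h, ih]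

-- a list is the table of its getD over its index range
theorem pv_getD_range (l : List Char) :
    (List.range l.length).map (fun i => l.getD i ' ') = l := by
  apply List.ext_getElem
  · simp
  · intro i h1 h2
    simp only [List.getElem_map, List.getElem_range]
    rw [List.getD_eq_getElem l ' ' h2]

-- B's row-major merge fold, read column by column
theorem pv_merge_shape :
    ∀ (rs : List (List Char)) (ans : List Char), (∀ r ∈ rs, ans.length ≤ r.length) →
      rs.foldl (fun a p => (a.zip p).map (fun ab => if ab.1 = ab.2 then ab.1 else '?')) ans
        = (List.range ans.length).map
            (fun i => rs.foldl (fun c r => if c = r.getD i ' ' then c else '?') (ans.getD i ' ')) := by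
  intro rs
  induction rs with
  | nil => intro ans _; simp only [List.foldl_nil]; exact (pv_getD_range ans).symm
  | cons r rs ih =>
    intro ans hle
    have hr : ans.length ≤ r.length := hle r List.mem_cons_self
    have hlen : ((ans.zip r).map (fun ab => if ab.1 = ab.2 then ab.1 else '?')).length = ans.length := by
      simp [List.length_zip]; omega
    simp only [List.foldl_cons]
    rw [ih _ (by intro r' hr'; rw [hlen]; exact hle r' (List.mem_cons_of_mem _ hr')), hlen]
    apply List.map_congr_left
    intro i hi
    have hi' : i < ans.length := List.mem_range.1 hi
    have hir : i < r.length := lt_of_lt_of_le hi' hr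
    congr 1
    have hiz : i < ((ans.zip r).map (fun ab => if ab.1 = ab.2 then ab.1 else '?')).length := by omega
    rw [List.getD_eq_getElem _ ' ' hiz, List.getElem_map, List.getElem_zip,
      List.getD_eq_getElem ans ' ' hi', List.getD_eq_getElem r ' ' hir]

-- the per-column merge step: keep the char while everything agrees, '?' is absorbing
theorem pv_fold_step :
    ∀ (l : List Char) (c : Char),
      l.foldl (fun c a => if c = a then c else '?') c
        = if l.all (fun a => a == c) then c else '?' := by
  intro l
  induction l with
  | nil => intro c; simp
  | cons a t ih =>
    intro c
    simp only [List.foldl_cons, List.all_cons]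
    by_cases h : c = a
    · subst h
      rw [if_pos rfl, ih]
      simp
    · rw [if_neg h, ih]
      have hac : (a == c) = false := by simp [ne_comm.1 h]
      simp [hac]

-- ===== VERDICT (by name: the statement is the Claim_ definition above) =====
theorem solution_spec : Claim_equal_solution := by
  intro N patterns _ hpre
  obtain ⟨hne, hNle, hlens⟩ := hpre
  obtain ⟨h, t, rfl⟩ : ∃ hd tl, patterns = hd :: tl := by
    cases patterns with
    | nil => exact absurd rfl hne
    | cons hd tl => exact ⟨hd, tl, rfl⟩
  simp only [List.headD_cons] at hlens
  show solution N (h :: t) = solution_alt N (h :: t)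
  simp only [solution, solution_alt, PySem.List.pyGet?_zero_cons, Option.getD_some]
  have hrows : ∀ r ∈ (PySem.List.pyRange 1 N 1).map
      (fun j => ((PySem.List.pyGet? (h :: t) j).getD "").toList), h.toList.length ≤ r.length := by
    intro r hr
    obtain ⟨j, hj, rfl⟩ := List.mem_map.1 hr
    obtain ⟨hj1, hjN⟩ := PySem.List.mem_pyRange_one.1 hj
    have hjlen : j < ((h :: t).length : Int) := lt_of_lt_of_le hjN hNle
    rw [PySem.List.pyGet?_eq_some_getElem _ (by omega) hjlen, Option.getD_some]
    have hjN' : j.toNat < N.toNat := by omega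
    have hjt : j.toNat < ((h :: t).take N.toNat).length := by
      simp only [List.length_take]
      refine lt_min hjN' (by omega)
    have hmem : (h :: t)[j.toNat] ∈ (h :: t).take N.toNat := by
      have hget := List.getElem_take (xs := h :: t) (j := N.toNat) (i := j.toNat) (h := hjt)
      rw [← hget]
      exact List.getElem_mem _
    exact hlens _ hmem
  rw [pv_foldl_if_append, List.nil_append,
    ← List.foldl_map (f := fun j : Int => ((PySem.List.pyGet? (h :: t) j).getD "").toList)
      (g := fun (a p : List Char) => (a.zip p).map (fun ab => if ab.1 = ab.2 then ab.1 else '?')),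
    pv_merge_shape _ _ hrows]
  rw [PySem.List.pyRange_zero_natCast h.toList.length, List.map_map]
  congr 1
  apply List.map_congr_left
  intro k hk
  have hk' : k < h.toList.length := List.mem_range.1 hk
  simp only [Function.comp_def, PySem.List.pyGet?_natCast, ← List.getD_eq_getElem?_getD]
  rw [pv_foldl_or, Bool.false_or,
    ← List.foldl_map (f := fun r : List Char => r.getD k ' ')
      (g := fun (c a : Char) => if c = a then c else '?'),
    List.map_map, pv_fold_step]
  simp only [Function.comp_def]
  set x : Char := h.toList.getD k ' ' with hx
  by_cases hN0 : N ≤ 1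
  · rw [PySem.List.pyRange_one_eq_nil hN0]
    by_cases hN00 : N ≤ 0
    · rw [PySem.List.pyRange_one_eq_nil hN00]; simp
    · have hN1 : N = 1 := by omega
      subst hN1
      rw [PySem.List.pyRange_one_cons (by norm_num : (0:Int) < 1),
        PySem.List.pyRange_one_eq_nil (by norm_num : (1:Int) ≤ 0 + 1)]
      simp [hx]
  · rw [PySem.List.pyRange_one_cons (by omega : (0:Int) < N)]
    rw [show (0:Int) + 1 = 1 by norm_num]
    rw [List.any_cons]
    have h0 : (decide (x ≠ ((((PySem.List.pyGet? (h :: t) 0).getD "").toList).getD k ' '))) = false := by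
      rw [PySem.List.pyGet?_zero_cons, Option.getD_some, hx]; simp
    rw [h0, Bool.false_or]
    by_cases hall : ((PySem.List.pyRange 1 N 1).map
        (fun j => ((((PySem.List.pyGet? (h :: t) j).getD "").toList).getD k ' '))).all (fun a => a == x) = true
    · rw [if_pos hall]
      have key : ∀ j ∈ PySem.List.pyRange 1 N 1,
          ((((PySem.List.pyGet? (h :: t) j).getD "").toList).getD k ' ') = x := by
        intro j hj
        have := List.all_eq_true.1 hall _ (List.mem_map_of_mem hj)
        simpa only [beq_iff_eq] using this
      have hany : ((PySem.List.pyRange 1 N 1).any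
          (fun j => decide (x ≠ ((((PySem.List.pyGet? (h :: t) j).getD "").toList).getD k ' ')))) = false := by
        rw [List.any_eq_false]
        intro j hj
        exact fun hd => (of_decide_eq_true hd) (key j hj).symm
      rw [hany]
      simp
    · rw [if_neg hall]
      rw [List.all_eq_true] at hall
      push Not at hall
      obtain ⟨y, hy, hyx⟩ := hall
      obtain ⟨j, hj, rfl⟩ := List.mem_map.1 hy
      have hany : ((PySem.List.pyRange 1 N 1).any
          (fun j => decide (x ≠ ((((PySem.List.pyGet? (h :: t) j).getD "").toList).getD k ' ')))) = true := by
        rw [List.any_eq_true]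
        refine ⟨j, hj, ?_⟩
        exact decide_eq_true (fun e => by rw [← e] at hyx; simp at hyx)
      rw [hany]
      rfl
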